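-- pv_equiv track=rewrite | github.com/Jouchef/ohtu_kandi_viitteet | src/services/reference_service.py | parse_bibtex
-- ===== SOURCE A (Python) =====
-- def parse_bibtex(bibtex):
--     """Parses a BibTeX entry and returns a dictionary of its fields."""
--     reference_type = bibtex.split('{', 1)[0].split('@', 1)[1]
--     reference_type = reference_type[0].upper() + reference_type[1:]
--
--     parts = bibtex.replace('@article{', '').rstrip(' }').split(', ')
--     bibtex_dict = {}
--     bibtex_dict = {'citation_key': parts[0],
--                    'reference_type': reference_type}
--
--     for part in parts[1:]:
--         key_value = part.split('=', 1)
--         if len(key_value) ==2: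
--             key, value = key_value
--             bibtex_dict[key.strip()] = value.strip('{} ').replace('\n', ' ')
--         else:
--             last_key = list(bibtex_dict.keys())[-1]
--             bibtex_dict[last_key] += ', ' + part.strip('{} ')
--     return bibtex_dict
-- ===== SOURCE B (Python) =====
-- def parse_bibtex(bibtex):
--     """Parses a BibTeX entry and returns a dictionary of its fields."""
--     reference_type = bibtex.split('{', 1)[0].split('@', 1)[1]
--     reference_type = reference_type[0].upper() + reference_type[1:]
--
--     parts = bibtex.replace('@article{', '').rstrip(' }').split(', ')
--
--     # pass 1: group the fragments -- a fragment that splits on '=' starts a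
--     # field (split once, keep both halves); one that does not is a
--     # continuation of the most recently started field
--     groups = []
--     for part in parts[1:]:
--         kv = part.split('=', 1)
--         if len(kv) == 2:
--             groups.append((kv[0], kv[1], []))
--         else:
--             groups[-1][2].append(part)
--
--     # pass 2: turn each group into one (key, value) pair
--     fields = []
--     for key, value, conts in groups:
--         v = value.strip('{} ').replace('\n', ' ')
--         for cont in conts:
--             v += ', ' + cont.strip('{} ')
--         fields.append((key.strip(), v))
--
--     return dict([('citation_key', parts[0]),
--                  ('reference_type', reference_type)] + fields)
-- ===== Notes on version B (the rewrite author's own statement) =====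
-- stated objective: alternative
-- what changed: Replaces A's mutable dict built fragment-by-fragment (with continuation fragments routed via the dict's positionally-last key) by a two-pass pipeline: first group the comma fragments into field groups (splitting each 'key=value' head once), then map each group to its (key, value) pair and build the result dict from the finished pair list in one go.
-- outside the precondition, e.g. on parse_bibtex('@a{c, w}'): A returns {'citation_key': '@a{c', 'reference_type': 'A, w'}, B raises IndexError
import Mathlib
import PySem

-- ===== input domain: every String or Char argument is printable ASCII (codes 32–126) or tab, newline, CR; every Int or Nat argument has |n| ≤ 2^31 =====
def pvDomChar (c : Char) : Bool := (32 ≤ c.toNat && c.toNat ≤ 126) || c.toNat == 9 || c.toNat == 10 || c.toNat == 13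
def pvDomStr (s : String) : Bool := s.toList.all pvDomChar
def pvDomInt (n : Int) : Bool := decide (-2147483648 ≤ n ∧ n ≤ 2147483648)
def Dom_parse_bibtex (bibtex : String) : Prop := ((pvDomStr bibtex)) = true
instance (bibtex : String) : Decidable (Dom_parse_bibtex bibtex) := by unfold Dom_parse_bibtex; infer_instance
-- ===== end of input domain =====

-- B restructures A's single mutable-dict loop into a two-pass grouping pipeline (objective: alternative, same cost).

-- exact port of Python str.rstrip(' }') (drop trailing ' ' and '}' characters), shared by both ports
def pyRstripSpBrace (s : String) : String :=
  String.ofList ((s.toList.reverse.dropWhile (fun c => c == ' ' || c == '}')).reverse)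

-- ===== PORT A =====
-- A's loop body: insert the field on 'key=value', else extend the dict's positionally-last key
def pvStepA (d : PySem.Dict String String) (part : String) : PySem.Dict String String :=
  let key_value := (PySem.Str.splitMax? part "=" 1).getD []
  if key_value.length == 2 then
    d.insert (PySem.Str.strip (key_value.headD ""))
      (PySem.Str.replace (PySem.Str.stripChars ((PySem.List.pyGet? key_value 1).getD "") "{} ") "\n" " ")
  else
    let last_key := (PySem.List.pyGet? d.keys (-1)).getD ""
    d.modify last_key "" (fun v => v ++ (", " ++ PySem.Str.stripChars part "{} "))

def parse_bibtex (bibtex : String) : List (String × String) :=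
  let rt0 := ((PySem.Str.splitMax? bibtex "{" 1).getD []).headD ""
  let rt1 := ((PySem.List.pyGet? ((PySem.Str.splitMax? rt0 "@" 1).getD []) 1)).getD ""
  let reference_type :=
    match rt1.toList with
    | [] => ""   -- Python raises IndexError on reference_type[0]; excluded by Pre_
    | c :: cs => String.ofList (PySem.Chars.upperChar c :: cs)
  let parts := (PySem.Str.split? (pyRstripSpBrace (PySem.Str.replace bibtex "@article{" "")) ", ").getD []
  let d0 := (PySem.Dict.empty.insert "citation_key" (parts.headD "")).insert "reference_type" reference_type
  (parts.tail.foldl pvStepA d0).items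

-- ===== PORT B =====
-- B's pass 1 body: a fragment splitting on '=' starts a group, otherwise it continues the last group
def pvStepB (gs : List (String × String × List String)) (part : String) :
    List (String × String × List String) :=
  let kv := (PySem.Str.splitMax? part "=" 1).getD []
  if kv.length == 2 then
    gs ++ [(kv.headD "", (PySem.List.pyGet? kv 1).getD "", [])]
  else
    match gs.getLast? with
    | some (k, v, cs) => gs.dropLast ++ [(k, v, cs ++ [part])]
    | none => gs   -- Python raises IndexError (groups[-1] on empty groups); excluded by Pre_

-- B's pass 2 body: one group to one (key, value) pair
def pvFieldOf (g : String × String × List String) : String × String :=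
  let v0 := PySem.Str.replace (PySem.Str.stripChars g.2.1 "{} ") "\n" " "
  let v := g.2.2.foldl (fun acc c => acc ++ ", " ++ PySem.Str.stripChars c "{} ") v0
  (PySem.Str.strip g.1, v)

def parse_bibtex_alt (bibtex : String) : List (String × String) :=
  let rt0 := ((PySem.Str.splitMax? bibtex "{" 1).getD []).headD ""
  let rt1 := ((PySem.List.pyGet? ((PySem.Str.splitMax? rt0 "@" 1).getD []) 1)).getD ""
  let reference_type :=
    match rt1.toList with
    | [] => ""   -- Python raises IndexError on reference_type[0]; excluded by Pre_
    | c :: cs => String.ofList (PySem.Chars.upperChar c :: cs)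
  let parts := (PySem.Str.split? (pyRstripSpBrace (PySem.Str.replace bibtex "@article{" "")) ", ").getD []
  let groups := parts.tail.foldl pvStepB []
  let fields := groups.map pvFieldOf
  let pairs := [("citation_key", parts.headD ""), ("reference_type", reference_type)] ++ fields
  (pairs.foldl (fun d p => d.insert p.1 p.2) PySem.Dict.empty).items

-- ===== PRECONDITION & SPEC =====
-- fragment starts a field, i.e. part.split('=', 1) has two pieces
def pvHasEq (part : String) : Bool := ((PySem.Str.splitMax? part "=" 1).getD []).length == 2
-- the stripped key of a field fragment
def pvKeyOf (part : String) : String :=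
  PySem.Str.strip (((PySem.Str.splitMax? part "=" 1).getD []).headD "")
-- the comma fragments after the citation key
def pvTail (bibtex : String) : List String :=
  ((PySem.Str.split? (pyRstripSpBrace (PySem.Str.replace bibtex "@article{" "")) ", ").getD []).tail

-- Pre_ excludes: (a) inputs with no '@' before the first '{' or an empty type name, on which A raises
-- IndexError; (b) entries whose first comma fragment after the citation key has no '=', where A's
-- appending it to reference_type is an accident of its dict and B raises IndexError; (c) entries that
-- both contain a continuation fragment and repeat a field key (or use 'citation_key'/'reference_type'
-- as a field key), where A's routing of continuations via the dict's positionally-last key is accidental.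
def Pre_parse_bibtex (bibtex : String) : Prop :=
  let head := ((PySem.Str.splitMax? bibtex "{" 1).getD []).headD ""
  let after := PySem.List.pyGet? ((PySem.Str.splitMax? head "@" 1).getD []) 1
  let tl := pvTail bibtex
  after.getD "" ≠ "" ∧
  (tl = [] ∨ pvHasEq (tl.headD "") = true) ∧
  ((∃ p ∈ tl, pvHasEq p = false) →
    ("citation_key" :: "reference_type" :: (tl.filter pvHasEq).map pvKeyOf).Nodup)

instance (bibtex : String) : Decidable (Pre_parse_bibtex bibtex) := by
  unfold Pre_parse_bibtex; infer_instance

def pvWitness_parse_bibtex : String := "@a{c, k={v}, w}"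

def Spec_parse_bibtex (bibtex : String) (out : List (String × String)) : Prop := out = parse_bibtex_alt bibtex
instance (bibtex : String) (out : List (String × String)) : Decidable (Spec_parse_bibtex bibtex out) := by unfold Spec_parse_bibtex; infer_instance

-- ===== CLAIM (what is proved, stated in full; the proofs are below) =====
def Claim_equal_parse_bibtex : Prop := ∀ (bibtex : String), Dom_parse_bibtex bibtex → Pre_parse_bibtex bibtex → Spec_parse_bibtex bibtex (parse_bibtex bibtex)

-- ===== LEMMAS AND PROOFS =====

-- A's field value for a fragment
def pvValOf (part : String) : String :=
  PySem.Str.replace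
    (PySem.Str.stripChars ((PySem.List.pyGet? ((PySem.Str.splitMax? part "=" 1).getD []) 1).getD "") "{} ")
    "\n" " "

lemma pv_insert_fresh (d : PySem.Dict String String) (k : String) (v : String)
    (h : d.contains k = false) : (d.insert k v).items = d.items ++ [(k, v)] := by
  simp [PySem.Dict.insert, h]

lemma pv_contains_false (xs : List (String × String)) (k : String)
    (h : k ∉ xs.map Prod.fst) : (PySem.Dict.mk xs).contains k = false := by
  simp only [PySem.Dict.contains, List.any_eq_false]
  intro p hp
  have : p.1 ≠ k := fun hk => h (hk ▸ List.mem_map_of_mem hp)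
  simp [this]

lemma pv_insert_last (xs : List (String × String)) (k v w : String)
    (h : k ∉ xs.map Prod.fst) :
    ((PySem.Dict.mk (xs ++ [(k, v)])).insert k w).items = xs ++ [(k, w)] := by
  have hc : (PySem.Dict.mk (xs ++ [(k, v)])).contains k = true := by
    simp [PySem.Dict.contains]
  simp only [PySem.Dict.insert, hc, if_pos]
  simp only [List.map_append]
  rw [List.map_congr_left (l := xs) (g := id) (fun p hp => by
      have : p.1 ≠ k := fun hk => h (hk ▸ List.mem_map_of_mem hp)
      simp [this])]
  simp

lemma pv_getD_last (xs : List (String × String)) (k v dflt : String)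
    (h : k ∉ xs.map Prod.fst) :
    (PySem.Dict.mk (xs ++ [(k, v)])).getD k dflt = v := by
  have hfind : xs.find? (fun p => p.1 == k) = none := by
    apply List.find?_eq_none.mpr
    intro p hp
    have : p.1 ≠ k := fun hk => h (hk ▸ List.mem_map_of_mem hp)
    simp [this]
  simp [PySem.Dict.getD, PySem.Dict.get?, List.find?_append, hfind]


lemma pv_split_nodup (a b k : String) (X Y : List String)
    (hnd : (a :: b :: (X ++ k :: Y)).Nodup) : k ≠ a ∧ k ≠ b ∧ k ∉ X := by
  have h1 := (List.nodup_cons.mp hnd).1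
  have h2 := (List.nodup_cons.mp (List.nodup_cons.mp hnd).2).1
  have h3 := List.disjoint_of_nodup_append (List.nodup_cons.mp (List.nodup_cons.mp hnd).2).2
  refine ⟨?_, ?_, ?_⟩
  · rintro rfl; exact h1 (by simp)
  · rintro rfl; exact h2 (by simp)
  · intro hk; exact h3 hk (by simp)

lemma pv_fresh (a b k ckv rtv : String) (X : List String)
    (xs : List (String × String × List String))
    (hfst : (xs.map pvFieldOf).map Prod.fst = X)
    (hka : k ≠ a) (hkb : k ≠ b) (hkX : k ∉ X) :
    k ∉ ([(a, ckv), (b, rtv)] ++ xs.map pvFieldOf).map Prod.fst := by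
  intro hm
  rcases (by simpa using hm :
      k = a ∨ k = b ∨ ∃ x y z, (x, y, z) ∈ xs ∧ (pvFieldOf (x, y, z)).1 = k) with hm | hm | ⟨x, y, z, hx, hk⟩
  · exact hka hm
  · exact hkb hm
  · apply hkX
    rw [← hfst, ← hk]
    exact List.mem_map_of_mem (List.mem_map_of_mem hx)

lemma pv_mapfst (hs : List (String × String × List String)) :
    (hs.map pvFieldOf).map Prod.fst = hs.map (fun g => PySem.Str.strip g.1) := by
  simp [pvFieldOf]

lemma pvLoop (l : List String) (gs : List (String × String × List String)) (ck rt : String)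
    (hnd : ("citation_key" :: "reference_type" ::
        (gs.map (fun g => PySem.Str.strip g.1) ++ (l.filter pvHasEq).map pvKeyOf)).Nodup)
    (hfst : gs = [] → (l = [] ∨ pvHasEq (l.headD "") = true)) :
    (l.foldl pvStepA (PySem.Dict.mk
        ([("citation_key", ck), ("reference_type", rt)] ++ gs.map pvFieldOf))).items
      = [("citation_key", ck), ("reference_type", rt)] ++ (l.foldl pvStepB gs).map pvFieldOf := by
  induction l generalizing gs with
  | nil => simp
  | cons p rest ih =>
    simp only [List.foldl_cons]
    by_cases hp : pvHasEq p = true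
    · -- field fragment: fresh insert on both sides
      have hfilter : ((p :: rest).filter pvHasEq).map pvKeyOf
          = pvKeyOf p :: (rest.filter pvHasEq).map pvKeyOf := by
        simp only [List.filter_cons, hp, if_true, List.map_cons]
      rw [hfilter] at hnd
      obtain ⟨hka, hkb, hkX⟩ := pv_split_nodup _ _ _ _ _ hnd
      have hfreshmem := pv_fresh "citation_key" "reference_type" (pvKeyOf p) ck rt _ gs
        (pv_mapfst gs) hka hkb hkX
      have hstep : pvStepA (PySem.Dict.mk
            ([("citation_key", ck), ("reference_type", rt)] ++ gs.map pvFieldOf)) p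
          = PySem.Dict.mk ([("citation_key", ck), ("reference_type", rt)]
              ++ (gs ++ [(((PySem.Str.splitMax? p "=" 1).getD []).headD "",
                (PySem.List.pyGet? ((PySem.Str.splitMax? p "=" 1).getD []) 1).getD "",
                ([] : List String))]).map pvFieldOf) := by
        apply PySem.Dict.ext
        simp only [pvStepA]
        rw [if_pos (by simpa only [pvHasEq] using hp)]
        rw [show PySem.Str.strip (((PySem.Str.splitMax? p "=" 1).getD []).headD "")
            = pvKeyOf p from rfl]
        rw [pv_insert_fresh _ _ _ (pv_contains_false _ _ hfreshmem)]
        simp only [PySem.Dict.items, List.map_append, List.map_cons, List.map_nil,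
          List.append_assoc, pvFieldOf, pvKeyOf, List.foldl_nil]
      have hstepB : pvStepB gs p = gs ++ [(((PySem.Str.splitMax? p "=" 1).getD []).headD "",
          (PySem.List.pyGet? ((PySem.Str.splitMax? p "=" 1).getD []) 1).getD "", ([] : List String))] := by
        simp only [pvStepB]
        rw [if_pos (by simpa only [pvHasEq] using hp)]
      rw [hstep, hstepB]
      apply ih
      · simpa only [List.map_append, List.map_cons, List.map_nil, pvFieldOf, pvKeyOf,
          List.append_assoc, List.singleton_append] using hnd
      · intro h; simp at h
    · -- continuation fragment: modify the last entry / extend the last group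
      have hgs : gs ≠ [] := by
        intro h
        rcases hfst h with h' | h'
        · exact List.cons_ne_nil _ _ h'
        · simp only [List.headD_cons] at h'; exact hp h'
      have hlast : gs.getLast? = some (gs.getLast hgs) := List.getLast?_eq_some_getLast ..
      obtain ⟨⟨k0, v0, cs0⟩, hdec⟩ : ∃ g, gs.getLast hgs = g := ⟨_, rfl⟩
      have hgseq : gs.dropLast ++ [(k0, v0, cs0)] = gs := by
        rw [← hdec]; exact List.dropLast_append_getLast hgs
      have hkeysgs : gs.map (fun g => PySem.Str.strip g.1)
          = gs.dropLast.map (fun g => PySem.Str.strip g.1) ++ [PySem.Str.strip k0] := by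
        rw [← hgseq]; simp
      have hfilter : ((p :: rest).filter pvHasEq) = rest.filter pvHasEq := by
        simp only [List.filter_cons, hp, if_false, Bool.false_eq_true]
      rw [hfilter, hkeysgs, List.append_assoc, List.singleton_append] at hnd
      obtain ⟨hka, hkb, hkX⟩ := pv_split_nodup _ _ _ _ _ hnd
      have hKfresh := pv_fresh "citation_key" "reference_type" (PySem.Str.strip k0) ck rt _
        gs.dropLast (pv_mapfst gs.dropLast) hka hkb hkX
      have hitems : [("citation_key", ck), ("reference_type", rt)] ++ gs.map pvFieldOf
          = ([("citation_key", ck), ("reference_type", rt)] ++ gs.dropLast.map pvFieldOf)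
            ++ [(PySem.Str.strip k0, (pvFieldOf (k0, v0, cs0)).2)] := by
        conv_lhs => rw [← hgseq]
        simp only [List.map_append, List.map_cons, List.map_nil, List.append_assoc]
        rfl
      have hlastkey : (PySem.List.pyGet? ((PySem.Dict.mk
            ([("citation_key", ck), ("reference_type", rt)] ++ gs.map pvFieldOf)).keys) (-1)).getD ""
          = PySem.Str.strip k0 := by
        rw [PySem.List.pyGet?_neg_one]
        simp only [PySem.Dict.keys, hitems, List.map_append]
        rw [List.getLast?_append]
        rfl
      have hstep : pvStepA (PySem.Dict.mk
            ([("citation_key", ck), ("reference_type", rt)] ++ gs.map pvFieldOf)) p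
          = PySem.Dict.mk ([("citation_key", ck), ("reference_type", rt)]
              ++ (gs.dropLast ++ [(k0, v0, cs0 ++ [p])]).map pvFieldOf) := by
        apply PySem.Dict.ext
        simp only [pvStepA]
        rw [if_neg (by simpa only [pvHasEq] using hp)]
        simp only [PySem.Dict.modify]
        rw [hlastkey, hitems]
        rw [pv_getD_last _ _ _ _ hKfresh, pv_insert_last _ _ _ _ hKfresh]
        have hfold : (pvFieldOf (k0, v0, cs0)).2 ++ (", " ++ PySem.Str.stripChars p "{} ")
            = (pvFieldOf (k0, v0, cs0 ++ [p])).2 := by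
          simp only [pvFieldOf, List.foldl_append, List.foldl_cons, List.foldl_nil,
            String.append_assoc]
        simp only [PySem.Dict.items, hfold, List.map_append, List.map_cons, List.map_nil,
          List.append_assoc]
        rfl
      have hstepB : pvStepB gs p = gs.dropLast ++ [(k0, v0, cs0 ++ [p])] := by
        simp only [pvStepB]
        rw [if_neg (by simpa only [pvHasEq] using hp), hlast, hdec]
      rw [hstep, hstepB]
      apply ih
      · have hk2 : (gs.dropLast ++ [(k0, v0, cs0 ++ [p])]).map (fun g => PySem.Str.strip g.1)
            = gs.dropLast.map (fun g => PySem.Str.strip g.1) ++ [PySem.Str.strip k0] := by simp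
        rw [hk2, List.append_assoc, List.singleton_append]
        exact hnd
      · intro h; simp at h

lemma pvGroupKeys (l : List String) (gs : List (String × String × List String))
    (hfst : gs = [] → (l = [] ∨ pvHasEq (l.headD "") = true)) :
    (l.foldl pvStepB gs).map (fun g => PySem.Str.strip g.1)
      = gs.map (fun g => PySem.Str.strip g.1) ++ (l.filter pvHasEq).map pvKeyOf := by
  induction l generalizing gs with
  | nil => simp
  | cons p rest ih =>
    simp only [List.foldl_cons]
    by_cases hp : pvHasEq p = true
    · have hstep : pvStepB gs p = gs ++ [(((PySem.Str.splitMax? p "=" 1).getD []).headD "",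
        (PySem.List.pyGet? ((PySem.Str.splitMax? p "=" 1).getD []) 1).getD "", ([] : List String))] := by
        simp only [pvStepB]; rw [if_pos (by simpa [pvHasEq] using hp)]
      rw [hstep, ih _ (fun h => by simp at h)]
      simp [hp, pvKeyOf, List.filter_cons]
    · have hgs : gs ≠ [] := by
        intro h
        rcases hfst h with h' | h'
        · exact List.cons_ne_nil _ _ h'
        · simp at h'; exact hp h'
      have hlast : gs.getLast? = some (gs.getLast hgs) := List.getLast?_eq_some_getLast ..
      obtain ⟨⟨k0, v0, cs0⟩, hdec⟩ : ∃ g, gs.getLast hgs = g := ⟨_, rfl⟩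
      have hstep : pvStepB gs p = gs.dropLast ++ [(k0, v0, cs0 ++ [p])] := by
        simp only [pvStepB]
        rw [if_neg (by simpa [pvHasEq] using hp), hlast, hdec]
      rw [hstep, ih _ (fun h => by simp at h)]
      have hgseq : gs.dropLast ++ [(k0, v0, cs0)] = gs := by
        rw [← hdec]; exact List.dropLast_append_getLast hgs
      have hkeys : (gs.dropLast ++ [(k0, v0, cs0 ++ [p])]).map (fun g => PySem.Str.strip g.1)
          = gs.map (fun g => PySem.Str.strip g.1) := by
        rw [← hgseq]; simp
      rw [hkeys]
      simp [List.filter_cons, hp]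

lemma pvGroupsAll (l : List String) (gs : List (String × String × List String))
    (h : ∀ p ∈ l, pvHasEq p = true) :
    l.foldl pvStepB gs = gs ++ l.map (fun p =>
      (((PySem.Str.splitMax? p "=" 1).getD []).headD "",
       (PySem.List.pyGet? ((PySem.Str.splitMax? p "=" 1).getD []) 1).getD "", ([] : List String))) := by
  induction l generalizing gs with
  | nil => simp
  | cons p rest ih =>
    have hp := h p (by simp)
    simp only [List.foldl_cons, List.map_cons]
    rw [show pvStepB gs p = gs ++ [(((PySem.Str.splitMax? p "=" 1).getD []).headD "",
       (PySem.List.pyGet? ((PySem.Str.splitMax? p "=" 1).getD []) 1).getD "", ([] : List String))] by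
      simp only [pvStepB]
      rw [if_pos (by simpa [pvHasEq] using hp)]]
    rw [ih _ (fun q hq => h q (by simp [hq]))]
    simp

lemma pvStepAAll (l : List String) (d : PySem.Dict String String)
    (h : ∀ p ∈ l, pvHasEq p = true) :
    l.foldl pvStepA d = l.foldl (fun d p => d.insert (pvKeyOf p) (pvValOf p)) d := by
  induction l generalizing d with
  | nil => rfl
  | cons p rest ih =>
    have hp := h p (by simp)
    simp only [List.foldl_cons]
    rw [show pvStepA d p = d.insert (pvKeyOf p) (pvValOf p) by
      simp only [pvStepA, pvKeyOf, pvValOf]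
      rw [if_pos (by simpa [pvHasEq] using hp)]]
    exact ih _ (fun q hq => h q (by simp [hq]))


-- B's pass 2 applied to singleton groups yields plain (key, value) pairs
lemma pvFieldsAll (l : List String) :
    (l.map (fun p =>
      (((PySem.Str.splitMax? p "=" 1).getD []).headD "",
       (PySem.List.pyGet? ((PySem.Str.splitMax? p "=" 1).getD []) 1).getD "", ([] : List String)))).map pvFieldOf
      = l.map (fun p => (pvKeyOf p, pvValOf p)) := by
  simp only [List.map_map]
  rfl

-- the two fixed head entries form the dict both loops start from
lemma pv_base (ck rt : String) :
    (PySem.Dict.empty.insert "citation_key" ck).insert "reference_type" rt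
      = PySem.Dict.mk [("citation_key", ck), ("reference_type", rt)] := by
  apply PySem.Dict.ext
  simp [PySem.Dict.insert, PySem.Dict.contains, PySem.Dict.empty]

lemma pv_contains_base (ck rt k : String) (hka : k ≠ "citation_key") (hkb : k ≠ "reference_type") :
    (PySem.Dict.mk [("citation_key", ck), ("reference_type", rt)]).contains k = false := by
  simp [PySem.Dict.contains, Ne.symm hka, Ne.symm hkb]

-- ===== VERDICT (by name: the statement is the Claim_ definition above) =====
theorem parse_bibtex_spec : Claim_equal_parse_bibtex := by
  intro bibtex _ hpre
  unfold Spec_parse_bibtex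
  obtain ⟨-, h2, h3⟩ := hpre
  show parse_bibtex bibtex = parse_bibtex_alt bibtex
  simp only [parse_bibtex, parse_bibtex_alt]
  rw [pvTail] at h2 h3
  generalize ((PySem.Str.split? (pyRstripSpBrace (PySem.Str.replace bibtex "@article{" "")) ", ").getD []) = parts at h2 h3 ⊢
  generalize (match (((PySem.List.pyGet? ((PySem.Str.splitMax? (((PySem.Str.splitMax? bibtex "{" 1).getD []).headD "") "@" 1).getD []) 1)).getD "").toList with
    | [] => ""
    | c :: cs => String.ofList (PySem.Chars.upperChar c :: cs)) = rt
  rw [pv_base]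
  rw [List.foldl_append]
  simp only [List.foldl_cons, List.foldl_nil]
  rw [pv_base]
  by_cases hcont : ∀ p ∈ parts.tail, pvHasEq p = true
  · -- every fragment is a field: both sides are the same plain insert fold
    rw [pvStepAAll _ _ hcont, pvGroupsAll _ _ hcont]
    simp only [List.nil_append, pvFieldsAll, List.foldl_map]
  · -- a continuation exists: all keys are distinct, use the loop invariant
    have hex : ∃ p ∈ parts.tail, pvHasEq p = false := by
      push_neg at hcont
      obtain ⟨p, hp, hnp⟩ := hcont
      exact ⟨p, hp, by simpa using hnp⟩
    have hnd := h3 hex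
    have hfst0 : ([] : List (String × String × List String)) = [] →
        (parts.tail = [] ∨ pvHasEq (parts.tail.headD "") = true) := fun _ => h2
    have hA := pvLoop parts.tail [] (parts.headD "") rt (by simpa using hnd) hfst0
    simp only [List.map_nil, List.append_nil] at hA
    rw [hA]
    have hkeys := pvGroupKeys parts.tail [] hfst0
    simp only [List.map_nil, List.nil_append] at hkeys
    have hnd' : (("citation_key" : String) :: "reference_type" ::
        ((parts.tail.foldl pvStepB []).map pvFieldOf).map Prod.fst).Nodup := by
      rw [pv_mapfst, hkeys]; exact hnd
    have hfree : ∀ pr ∈ (parts.tail.foldl pvStepB []).map pvFieldOf,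
        (PySem.Dict.mk [("citation_key", parts.headD ""), ("reference_type", rt)]).contains pr.1 = false := by
      intro pr hpr
      have hmem : pr.1 ∈ ((parts.tail.foldl pvStepB []).map pvFieldOf).map Prod.fst :=
        List.mem_map_of_mem hpr
      refine pv_contains_base _ _ _ ?_ ?_
      · intro hk
        exact (List.nodup_cons.mp hnd').1 (by rw [← hk]; exact List.mem_cons_of_mem _ hmem)
      · intro hk
        exact (List.nodup_cons.mp (List.nodup_cons.mp hnd').2).1 (by rw [← hk]; exact hmem)
    rw [PySem.Dict.items_foldl_insert_fresh _ Prod.fst Prod.snd _ hfree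
      (List.nodup_cons.mp (List.nodup_cons.mp hnd').2).2]
    simp
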